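-- pv_equiv track=rewrite | github.com/jcmgray/cotengrust | tests/test_cotengrust.py | eq_to_inputs_output
-- ===== SOURCE A (Python) =====
-- def find_output_str(lhs):
--     tmp_lhs = lhs.replace(",", "")
--     return "".join(s for s in sorted(set(tmp_lhs)) if tmp_lhs.count(s) == 1)
--
-- def eq_to_inputs_output(eq):
--     if "->" not in eq:
--         eq += "->" + find_output_str(eq)
--     inputs, output = eq.split("->")
--     inputs = inputs.split(",")
--     inputs = [list(s) for s in inputs]
--     output = list(output)
--     return inputs, output
-- ===== SOURCE B (Python) =====
-- def find_output_str(lhs):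
--     # sort the comma-stripped string once, then peel maximal runs of equal
--     # characters recursively, keeping only singleton runs
--     def go(s):
--         if not s:
--             return ""
--         c = s[0]
--         rest = s[1:]
--         k = 0
--         while k < len(rest) and rest[k] == c:
--             k += 1
--         out = go(rest[k:])
--         return out if k else c + out
--     return go("".join(sorted(lhs.replace(",", ""))))
--
-- def eq_to_inputs_output(eq):
--     if "->" not in eq:
--         eq += "->" + find_output_str(eq)
--     inputs, output = eq.split("->")
--     inputs = inputs.split(",")
--     inputs = [list(s) for s in inputs]
--     output = list(output)
--     return inputs, output
-- ===== Notes on version B (the rewrite author's own statement) =====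
-- stated objective: alternative
-- what changed: find_output_str no longer builds the set of distinct characters and rescans the whole string with .count for each of them; B sorts the comma-stripped string once and recursively peels maximal runs of equal characters, emitting a character exactly when its run has length 1; the splitting shell is unchanged.
import Mathlib
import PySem

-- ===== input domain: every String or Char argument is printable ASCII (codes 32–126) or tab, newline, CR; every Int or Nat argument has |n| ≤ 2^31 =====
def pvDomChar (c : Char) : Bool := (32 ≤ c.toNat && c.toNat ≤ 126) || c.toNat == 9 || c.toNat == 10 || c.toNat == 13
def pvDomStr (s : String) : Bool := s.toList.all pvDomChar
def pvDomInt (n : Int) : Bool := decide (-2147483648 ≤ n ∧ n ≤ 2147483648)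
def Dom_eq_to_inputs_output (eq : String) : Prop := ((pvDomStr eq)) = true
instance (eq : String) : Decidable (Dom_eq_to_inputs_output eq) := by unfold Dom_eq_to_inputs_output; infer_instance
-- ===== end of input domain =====

-- B replaces find_output_str's sorted(set)+per-char .count rescans by one sort of the whole
-- comma-stripped string followed by a recursive scan that peels maximal runs of equal
-- characters and keeps the singleton runs; the splitting shell is unchanged (objective: alternative).

-- ===== PORT A =====
-- find_output_str: tmp = lhs.replace(",",""); "".join(s for s in sorted(set(tmp)) if tmp.count(s) == 1)
def find_output_str (lhs : String) : String :=
  let tmp := PySem.Str.replace lhs "," ""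
  PySem.Str.join ""
    (((PySem.List.sorted (PySem.Set.ofList tmp.toList) (fun x => x)).filter
        (fun c => PySem.Chars.count tmp.toList [c] == 1)).map (fun c => String.ofList [c]))

def eq_to_inputs_output (eq : String) : List (List String) × List String :=
  let eq := if PySem.Str.isIn "->" eq then eq else eq ++ "->" ++ find_output_str eq
  match PySem.Str.split? eq "->" with
  | some [inputs, output] =>
      (((PySem.Str.split? inputs ",").getD []).map (fun s => s.toList.map (fun c => String.ofList [c])),
       output.toList.map (fun c => String.ofList [c]))
  | _ => ([], [])   -- Python raises ValueError here (tuple unpack of ≠ 2 parts); excluded by Pre_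

-- ===== PORT B =====
-- go(s): peel the leading maximal run of equal characters off the sorted list,
-- keep its character iff the run is a singleton (k = the while loop's counter)
def pvRunGo (s : List Char) : List Char :=
  match s with
  | [] => []
  | c :: rest =>
      let k := (rest.takeWhile (fun x => x == c)).length   -- while k < len(rest) and rest[k] == c: k += 1
      let out := pvRunGo (rest.dropWhile (fun x => x == c))  -- go(rest[k:])
      if k == 0 then c :: out else out
termination_by s.length
decreasing_by
  simp only [List.length_cons]
  exact Nat.lt_succ_of_le (List.length_dropWhile_le _ _)

def find_output_str_alt (lhs : String) : String :=
  let tmp := PySem.Str.replace lhs "," ""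
  String.ofList (pvRunGo (PySem.List.sorted tmp.toList (fun x => x)))

def eq_to_inputs_output_alt (eq : String) : List (List String) × List String :=
  let eq := if PySem.Str.isIn "->" eq then eq else eq ++ "->" ++ find_output_str_alt eq
  match PySem.Str.split? eq "->" with
  | some parts =>
      match parts with
      | inputs :: output :: [] =>
          (((PySem.Str.split? inputs ",").getD []).map
              (fun s => s.toList.map (fun c => String.ofList [c])),
           output.toList.map (fun c => String.ofList [c]))
      | [] => ([], [])        -- Python raises ValueError here (tuple unpack of ≠ 2 parts);
      | _ :: [] => ([], [])   -- excluded by Pre_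
      | _ :: _ :: _ :: _ => ([], [])
  | none => ([], [])

-- ===== PRECONDITION & SPEC =====
-- Pre_ excludes exactly the inputs where Python A raises ValueError (tuple unpacking of
-- eq.split("->")): an eq containing "->" more than once, or an eq without "->" whose derived
-- implicit output itself contains "->" (both '-' and '>' occur exactly once and no character
-- strictly between them occurs exactly once, so the sorted output puts '-' right before '>').
-- B raises there too (same splitting shell).
def Pre_eq_to_inputs_output (eq : String) : Prop :=
  if PySem.Str.isIn "->" eq then PySem.Str.count eq "->" = 1
  else
    ¬ (let t := (PySem.Str.replace eq "," "").toList
       t.count '-' = 1 ∧ t.count '>' = 1 ∧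
       ∀ c ∈ ['.', '/', '0', '1', '2', '3', '4', '5', '6', '7', '8', '9', ':', ';', '<', '='],
         t.count c ≠ 1)
instance (eq : String) : Decidable (Pre_eq_to_inputs_output eq) := by
  unfold Pre_eq_to_inputs_output; infer_instance

def pvWitness_eq_to_inputs_output : String := "ab,bc->ac"

def Spec_eq_to_inputs_output (eq : String) (out : List (List String) × List String) : Prop :=
  out = eq_to_inputs_output_alt eq
instance (eq : String) (out : List (List String) × List String) :
    Decidable (Spec_eq_to_inputs_output eq out) := by unfold Spec_eq_to_inputs_output; infer_instance

-- ===== CLAIM (what is proved, stated in full; the proofs are below) =====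
def Claim_equal_eq_to_inputs_output : Prop :=
  ∀ (eq : String), Dom_eq_to_inputs_output eq → Pre_eq_to_inputs_output eq →
    Spec_eq_to_inputs_output eq (eq_to_inputs_output eq)

-- ===== LEMMAS AND PROOFS =====

-- Chars.count with a single-character needle is the element count.
theorem count_go_singleton (c : Char) (l : List Char) (fuel acc : Nat) (h : l.length ≤ fuel) :
    PySem.Chars.count.go [c] fuel l acc = acc + l.count c := by
  induction fuel generalizing l acc with
  | zero =>
    have : l = [] := List.length_eq_zero_iff.mp (Nat.le_zero.mp h)
    subst this
    simp [PySem.Chars.count.go]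
  | succ fuel ih =>
    match l with
    | [] => simp [PySem.Chars.count.go]
    | a :: t =>
      rw [PySem.Chars.count.go.eq_def]
      simp only [List.count_cons]
      by_cases hc : c = a
      · subst hc
        rw [if_pos (by simp [List.isPrefixOf])]
        simp only [List.length_singleton, List.drop_one, List.tail_cons]
        rw [ih t (acc + 1) (by simpa using h)]
        simp; omega
      · rw [if_neg (by simp [List.isPrefixOf]; exact hc)]
        rw [ih t acc (by simpa using h)]
        have : (a == c) = false := by simp; exact fun h' => hc h'.symm
        simp [this]

theorem count_singleton (t : List Char) (c : Char) :
    PySem.Chars.count t [c] = t.count c := by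
  have h0 : ([c].isEmpty = true) = False := by simp
  simp only [PySem.Chars.count, h0, if_false]
  simpa using count_go_singleton c t t.length 0 le_rfl

-- Set.ofList is a SUBLIST of its argument (first occurrences, in order)
theorem foldl_add_sublist (l s : List Char) :
    ∃ u, l.foldl PySem.Set.add s = s ++ u ∧ u.Sublist l := by
  induction l generalizing s with
  | nil => exact ⟨[], by simp⟩
  | cons a t ih =>
    by_cases ha : a ∈ s
    · obtain ⟨u, hu, hs⟩ := ih s
      exact ⟨u, by simpa [PySem.Set.add, PySem.Set.contains, ha] using hu, hs.cons a⟩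
    · obtain ⟨u, hu, hs⟩ := ih (s ++ [a])
      exact ⟨a :: u, by simpa [PySem.Set.add, PySem.Set.contains, ha] using hu, hs.cons₂ a⟩

theorem ofList_sublist (l : List Char) : (PySem.Set.ofList l).Sublist l := by
  obtain ⟨u, hu, hs⟩ := foldl_add_sublist l []
  rw [PySem.Set.ofList_eq_foldl, hu]; simpa using hs

-- sorted(set(t)) = set(sorted(t)) : both are the strictly increasing list of distinct chars
theorem sorted_ofList_comm (t : List Char) :
    PySem.List.sorted (PySem.Set.ofList t) (fun x => x) =
      PySem.Set.ofList (PySem.List.sorted t (fun x => x)) := by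
  apply PySem.List.sorted_eq_of_perm_of_pairwise_lt
  · apply (List.perm_ext_iff_of_nodup (PySem.Set.nodup_ofList _) (PySem.Set.nodup_ofList _)).mpr
    intro x
    simp [PySem.Set.mem_ofList, PySem.List.mem_sorted]
  · have hsub := ofList_sublist (PySem.List.sorted t (fun x => x))
    have hle : (PySem.Set.ofList (PySem.List.sorted t (fun x => x))).Pairwise (· ≤ ·) :=
      (PySem.List.sorted_pairwise t (fun x => x)).sublist hsub
    have hne : (PySem.Set.ofList (PySem.List.sorted t (fun x => x))).Pairwise (· ≠ ·) :=
      PySem.Set.nodup_ofList _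
    exact (hle.and hne).imp (fun h => lt_of_le_of_ne h.1 h.2)

-- seen-set cons commutes with foldl add when the new element never recurs
theorem foldl_add_cons (c : Char) (l s : List Char) (h : c ∉ l) :
    l.foldl PySem.Set.add (c :: s) = c :: l.foldl PySem.Set.add s := by
  induction l generalizing s with
  | nil => rfl
  | cons a t ih =>
    have hac : a ≠ c := fun he => h (he ▸ List.mem_cons_self)
    have : PySem.Set.add (c :: s) a = c :: PySem.Set.add s a := by
      have hcc : (a == c) = false := by simp [hac]
      simp only [PySem.Set.add, PySem.Set.contains, List.contains_cons, hcc, Bool.false_or]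
      split <;> rfl
    rw [List.foldl_cons, this, List.foldl_cons, ih _ (fun hm => h (List.mem_cons_of_mem _ hm))]

theorem ofList_run (c : Char) (run rest' : List Char)
    (h1 : ∀ x ∈ run, x = c) (h2 : c ∉ rest') :
    PySem.Set.ofList (c :: (run ++ rest')) = c :: PySem.Set.ofList rest' := by
  rw [PySem.Set.ofList_eq_foldl, PySem.Set.ofList_eq_foldl]
  have hstep : PySem.Set.add [] c = [c] := rfl
  rw [List.foldl_cons, hstep, List.foldl_append]
  have hrun : run.foldl PySem.Set.add [c] = [c] := by
    induction run with
    | nil => rfl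
    | cons a t ih =>
      have ha : a = c := h1 a List.mem_cons_self
      subst ha
      have : PySem.Set.add [a] a = [a] := by simp [PySem.Set.add, PySem.Set.contains]
      rw [List.foldl_cons, this, ih (fun x hx => h1 x (List.mem_cons_of_mem _ hx))]
  rw [hrun]
  exact foldl_add_cons c rest' [] h2

-- one peeled run: the count-1 filter of the distinct chars factors through the tail
theorem run_step (c : Char) (run rest' : List Char)
    (hrunc : ∀ x ∈ run, x = c) (hcnot : c ∉ rest') :
    ((PySem.Set.ofList (c :: (run ++ rest'))).filter
        (fun d => (c :: (run ++ rest')).count d == 1))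
      = (if run.length == 0 then [c] else [])
        ++ (PySem.Set.ofList rest').filter (fun d => rest'.count d == 1) := by
  rw [ofList_run c run rest' hrunc hcnot, List.filter_cons]
  have h1 : (c :: (run ++ rest')).count c = run.length + 1 := by
    have hr : run.count c = run.length :=
      List.count_eq_length.mpr (fun b hb => by rw [hrunc b hb])
    simp [List.count_append, hr, List.count_eq_zero.mpr hcnot]
  have h2 : ∀ d ∈ PySem.Set.ofList rest',
      ((c :: (run ++ rest')).count d == 1) = (rest'.count d == 1) := by
    intro d hd
    have hdm : d ∈ rest' := (PySem.Set.mem_ofList _ _).mp hd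
    have hdc : d ≠ c := fun he => hcnot (he ▸ hdm)
    have hz : run.count d = 0 :=
      List.count_eq_zero.mpr (fun hm => hdc (hrunc d hm))
    simp [List.count_append, hz, Ne.symm hdc]
  rw [List.filter_congr h2, h1]
  have h3 : ((run.length + 1 : Nat) == 1) = (run.length == 0) := by simp
  rw [h3]
  split <;> simp

-- facts extracted from sortedness for the cons case of the scan
theorem sorted_cons_facts (c : Char) (rest : List Char)
    (hs : (c :: rest).Pairwise (· ≤ ·)) :
    (∀ x ∈ rest.takeWhile (fun x => x == c), x = c) ∧
      c ∉ rest.dropWhile (fun x => x == c) ∧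
      (rest.dropWhile (fun x => x == c)).Pairwise (· ≤ ·) := by
  obtain ⟨hcle, hrp⟩ := List.pairwise_cons.mp hs
  refine ⟨fun x hx => by simpa using List.mem_takeWhile_imp hx, ?_, ?_⟩
  · intro hc
    cases hr : rest.dropWhile (fun x => x == c) with
    | nil => rw [hr] at hc; simp at hc
    | cons d tl =>
      have hne : rest.dropWhile (fun x => x == c) ≠ [] := by rw [hr]; simp
      have hd : (d == c) = false := by
        have := List.head_dropWhile_not (p := fun x => x == c) (l := rest) hne
        simpa [hr] using this
      have hdc : d ≠ c := by simpa using hd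
      rw [hr] at hc
      rcases List.mem_cons.mp hc with he | hc
      · exact hdc he.symm
      · have hdrop : (d :: tl).Sublist rest := hr ▸ List.dropWhile_sublist _
        have hdle : d ≤ c := by
          have hp : (d :: tl).Pairwise (· ≤ ·) := hrp.sublist hdrop
          exact (List.pairwise_cons.mp hp).1 c hc
        have hcd : c ≤ d := hcle d (hdrop.subset List.mem_cons_self)
        exact hdc (le_antisymm hdle hcd)
  · exact hrp.sublist (List.dropWhile_sublist _)

-- the run scan over a sorted list = the distinct chars of count 1, in order
theorem pvRunGo_eq (s : List Char) (hs : s.Pairwise (· ≤ ·)) :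
    pvRunGo s = (PySem.Set.ofList s).filter (fun c => s.count c == 1) := by
  induction s using pvRunGo.induct with
  | case1 => simp [pvRunGo]
  | case2 c rest k out ih =>
    obtain ⟨hrunc, hcnot, hrp⟩ := sorted_cons_facts c rest hs
    have hsplit := List.takeWhile_append_dropWhile (p := fun x => x == c) (l := rest)
    have hrhs := run_step c (rest.takeWhile (fun x => x == c))
      (rest.dropWhile (fun x => x == c)) hrunc hcnot
    rw [hsplit] at hrhs
    rw [hrhs, pvRunGo.eq_def]
    simp only [ih hrp]
    split <;> simp
  | case3 c rest k out ih =>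
    obtain ⟨hrunc, hcnot, hrp⟩ := sorted_cons_facts c rest hs
    have hsplit := List.takeWhile_append_dropWhile (p := fun x => x == c) (l := rest)
    have hrhs := run_step c (rest.takeWhile (fun x => x == c))
      (rest.dropWhile (fun x => x == c)) hrunc hcnot
    rw [hsplit] at hrhs
    rw [hrhs, pvRunGo.eq_def]
    simp only [ih hrp]
    split <;> simp

-- "".join of singleton strings is the string of the character list
theorem join_singletons (L : List Char) :
    PySem.Str.join "" (L.map (fun c => String.ofList [c])) = String.ofList L := by
  have h1 : (PySem.Str.join "" (L.map (fun c => String.ofList [c]))).toList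
      = (String.ofList L).toList := by
    simp only [PySem.Str.toList_join, List.map_map, String.toList_ofList]
    rw [show (String.toList ∘ fun c => String.ofList [c]) = (fun c => [c]) from
      funext fun c => by simp]
    simp [PySem.Chars.join_nil_singletons (cs := L)]
  exact String.toList_inj.mp h1

-- the two helpers agree everywhere
theorem find_output_str_eq (lhs : String) :
    find_output_str lhs = find_output_str_alt lhs := by
  simp only [find_output_str, find_output_str_alt]
  rw [sorted_ofList_comm]
  have hf : (fun c => PySem.Chars.count (PySem.Str.replace lhs "," "").toList [c] == 1)
      = (fun c => List.count c
          (PySem.List.sorted (PySem.Str.replace lhs "," "").toList (fun x => x)) == 1) :=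
    funext fun c => by
      rw [count_singleton,
        (PySem.List.sorted_perm (PySem.Str.replace lhs "," "").toList (fun x => x) false).count_eq c]
  rw [hf, ← pvRunGo_eq _ (by
    simpa using PySem.List.sorted_pairwise (PySem.Str.replace lhs "," "").toList (fun x => x))]
  exact join_singletons _

-- the flat two-element match of A's shell equals B's nested match, for every split? result
theorem shells_eq (r : Option (List String))
    (f : String → String → List (List String) × List String) :
    (match r with
      | some [i, o] => f i o
      | _ => (([] : List (List String)), ([] : List String)))
    = (match r with
      | some parts =>
          match parts with
          | i :: o :: [] => f i o
          | [] => (([] : List (List String)), ([] : List String))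
          | _ :: [] => (([] : List (List String)), ([] : List String))
          | _ :: _ :: _ :: _ => (([] : List (List String)), ([] : List String))
      | none => (([] : List (List String)), ([] : List String))) := by
  rcases r with _ | l
  · rfl
  · rcases l with _ | ⟨a, _ | ⟨b, _ | ⟨c, rest⟩⟩⟩ <;> rfl

-- ===== VERDICT (by name: the statement is the Claim_ definition above) =====
theorem eq_to_inputs_output_spec : Claim_equal_eq_to_inputs_output := by
  intro eq _ _
  unfold Spec_eq_to_inputs_output eq_to_inputs_output eq_to_inputs_output_alt
  rw [find_output_str_eq]
  exact shells_eq _ _
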